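-- pv_equiv track=rewrite | github.com/ChrisS2812/ComputingMaximumSuffixes | src/DeprecatedAlgorithms/GreedyAlgorithm.py | compute_max_prefix_greedy
-- ===== SOURCE A (Python) =====
-- def compute_max_prefix_greedy(word):
--     r = 0
--     i = 1
--     leading_max_values_of_maximum = 1
--     leading_max_values_current = 1
--     max_is_expanding = True
--
--     while i < len(word):
--         if word[r] < word[i]:
--             r = i
--             i = r+1
--             leading_max_values_of_maximum = 1
--             leading_max_values_current = 0
--             max_is_expanding = True
--         elif word[r] > word[i]:
--             i += 1
--             leading_max_values_current = 0
--             max_is_expanding = False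
--
--         else:
--             leading_max_values_current += 1
--             i += 1
--
--             if max_is_expanding:
--                 leading_max_values_of_maximum += 1
--                 continue
--
--             if leading_max_values_current == leading_max_values_of_maximum:
--                 j = r + leading_max_values_of_maximum - 1
--                 k = i - 1
--
--                 while True:
--                     j += 1
--                     k += 1
--
--                     if k >= len(word):
--                         return r
--
--                     if word[j] > word[k]:
--                         break
--                     elif word[j] < word[k]:
--                         r = i - leading_max_values_current
--                         break
--
--             if leading_max_values_current > leading_max_values_of_maximum:
--                 r = i - leading_max_values_current
--                 leading_max_values_of_maximum = leading_max_values_current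
--                 leading_max_values_current = 0
--                 i = r + leading_max_values_of_maximum
--                 max_is_expanding = True
--     return r
-- ===== SOURCE B (Python) =====
-- def compute_max_prefix_greedy(word):
--     # Two-pointer maximum-suffix scan (Crochemore-style): candidate i, rival j,
--     # matched length k.
--     n = len(word)
--     i, j, k = 0, 1, 0
--     while i + k < n and j + k < n:
--         a, b = word[i + k], word[j + k]
--         if a == b:
--             k += 1
--         elif a > b:
--             j = j + k + 1
--             k = 0
--         else:
--             i = max(i + k + 1, j)
--             j = i + 1
--             k = 0
--     return i
-- ===== Notes on version B (the rewrite author's own statement) =====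
-- stated objective: alternative
-- what changed: Replaced A's greedy run-counting scan (candidate run length / current run length counters plus a re-scanning inner comparison loop) by the classic two-pointer maximum-suffix scan that keeps a candidate index, a rival index and a matched length.
import Mathlib
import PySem

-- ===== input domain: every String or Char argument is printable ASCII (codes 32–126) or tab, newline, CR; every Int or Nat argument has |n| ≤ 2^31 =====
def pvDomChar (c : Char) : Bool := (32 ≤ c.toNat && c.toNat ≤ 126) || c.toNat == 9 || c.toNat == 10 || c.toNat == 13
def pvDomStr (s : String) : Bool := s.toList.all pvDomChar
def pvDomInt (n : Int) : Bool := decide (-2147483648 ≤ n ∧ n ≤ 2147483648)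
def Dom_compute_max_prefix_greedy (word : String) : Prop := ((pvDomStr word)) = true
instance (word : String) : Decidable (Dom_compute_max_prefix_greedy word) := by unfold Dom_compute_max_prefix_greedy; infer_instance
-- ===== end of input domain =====

-- B replaces A's greedy run-counting scan (run-length counters plus a re-scanning inner
-- comparison loop) by the classic two-pointer maximum-suffix scan; both return the start index
-- of the lexicographically maximum suffix, proved equal via a common characterization below.

-- ===== PORT A =====
-- w[x] for an index that is always in range in A (python would raise IndexError out of
-- range; A never accesses out of range, proved by the invariants below), so getD is exact here.
def pvGd (w : List Char) (x : Nat) : Char := w.getD x ' '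

-- A's inner `while True` loop: `none` = Python's early `return r`; `some r'` = break,
-- continuing the outer loop with r = r'.
-- fuel only bounds the recursion depth (w.length always suffices); it adds no behaviour.
def pvInnerA (w : List Char) (r c i : Nat) (j k : Nat) : Nat → Option Nat
  | 0 => none
  | fuel+1 =>
    if w.length ≤ k + 1 then none
    else if pvGd w (k+1) < pvGd w (j+1) then some r
    else if pvGd w (j+1) < pvGd w (k+1) then some (i - c)
    else pvInnerA w r c i (j+1) (k+1) fuel

-- A's outer while loop; state (r, i, m, c, e) = (r, i, leading_max_values_of_maximum,
-- leading_max_values_current, max_is_expanding).  In the equal branch Python first does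
-- c += 1; i += 1, hence the `c+1` / `i+1` below; inner loop starts at j = r+m-1, k = (i+1)-1 = i.
def pvLoopA (w : List Char) (r i m c : Nat) (e : Bool) : Nat → Nat
  | 0 => r
  | fuel+1 =>
    if i < w.length then
      if pvGd w r < pvGd w i then pvLoopA w i (i+1) 1 0 true fuel
      else if pvGd w i < pvGd w r then pvLoopA w r (i+1) m 0 false fuel
      else if e then pvLoopA w r (i+1) (m+1) (c+1) true fuel
      else if c + 1 = m then
        match pvInnerA w r (c+1) (i+1) (r + m - 1) i w.length with
        | none => r
        | some r' => pvLoopA w r' (i+1) m (c+1) false fuel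
      else if m < c + 1 then
        pvLoopA w ((i+1) - (c+1)) (((i+1) - (c+1)) + (c+1)) (c+1) 0 true fuel
      else pvLoopA w r (i+1) m (c+1) false fuel
    else r

def compute_max_prefix_greedy (word : String) : Int :=
  Int.ofNat (pvLoopA word.toList 0 1 1 1 true word.toList.length)

-- ===== PORT B =====
-- Source B's loop state (i, j, k): candidate i, rival j, matched length k.
-- fuel only bounds the recursion depth (3*w.length always suffices); it adds no behaviour.
def pvLoopB (w : List Char) (i j k : Nat) : Nat → Nat
  | 0 => i
  | fuel+1 =>
    if i + k < w.length ∧ j + k < w.length then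
      if pvGd w (i+k) = pvGd w (j+k) then pvLoopB w i j (k+1) fuel
      else if pvGd w (j+k) < pvGd w (i+k) then pvLoopB w i (j+k+1) 0 fuel
      else pvLoopB w (if j ≤ i + k + 1 then i+k+1 else j)
             ((if j ≤ i + k + 1 then i+k+1 else j) + 1) 0 fuel
    else i

def compute_max_prefix_greedy_alt (word : String) : Int :=
  Int.ofNat (pvLoopB word.toList 0 1 0 (3 * word.toList.length))

-- ===== PRECONDITION & SPEC =====
def Spec_compute_max_prefix_greedy (word : String) (out : Int) : Prop := out = compute_max_prefix_greedy_alt word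
instance (word : String) (out : Int) : Decidable (Spec_compute_max_prefix_greedy word out) := by unfold Spec_compute_max_prefix_greedy; infer_instance

-- ===== CLAIM (what is proved, stated in full; the proofs are below) =====
def Claim_equal_compute_max_prefix_greedy : Prop := ∀ (word : String), Dom_compute_max_prefix_greedy word → Spec_compute_max_prefix_greedy word (compute_max_prefix_greedy word)

-- ===== LEMMAS AND PROOFS =====

-- Python's `<` on strings (lexicographic, shorter prefix is smaller), proof-side only.
def pvLt : List Char → List Char → Bool
  | [], [] => false
  | [], _ :: _ => true
  | _ :: _, [] => false
  | a :: x, b :: y => if a < b then true else if b < a then false else pvLt x y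

-- s is the start of the (unique) lexicographically maximal suffix of w
def pvIsMax (w : List Char) (s : Nat) : Prop :=
  s < w.length ∧ ∀ t, t < w.length → pvLt (w.drop s) (w.drop t) = false

theorem pvGd_eq {w : List Char} {x : Nat} (h : x < w.length) : pvGd w x = w[x] := by
  simp [pvGd, List.getD_eq_getElem?_getD, List.getElem?_eq_getElem h]

theorem pvDrop_cons {w : List Char} {p : Nat} (h : p < w.length) :
    w.drop p = pvGd w p :: w.drop (p+1) := by
  rw [pvGd_eq h]; exact List.drop_eq_getElem_cons h

theorem pvLt_irrefl (x : List Char) : pvLt x x = false := by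
  induction x with
  | nil => rfl
  | cons a x ih => simp [pvLt, ih]

theorem pvLt_nil_right (x : List Char) : pvLt x [] = false := by cases x <;> rfl

theorem pvLt_nil_left {y : List Char} (h : y ≠ []) : pvLt [] y = true := by
  cases y with
  | nil => exact absurd rfl h
  | cons b y => rfl

theorem pvLt_trans : ∀ {x y z : List Char}, pvLt x y = true → pvLt y z = true → pvLt x z = true := by
  intro x
  induction x with
  | nil =>
    intro y z hxy hyz
    cases z with
    | nil =>
      cases y with
      | nil => exact hxy
      | cons b y => rw [pvLt_nil_right] at hyz; exact absurd hyz (by simp)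
    | cons c z => rfl
  | cons a x ih =>
    intro y z hxy hyz
    cases y with
    | nil => rw [pvLt_nil_right] at hxy; exact absurd hxy (by simp)
    | cons b y =>
      cases z with
      | nil => rw [pvLt_nil_right] at hyz; exact absurd hyz (by simp)
      | cons c z =>
        simp only [pvLt] at hxy hyz ⊢
        by_cases h1 : a < b
        · -- a < b; from hyz, b < c or (b = c); either way a < c
          by_cases h2 : b < c
          · simp [lt_trans h1 h2]
          · by_cases h3 : c < b
            · simp [h2, h3] at hyz
            · have : b = c := le_antisymm (not_lt.1 h3) (not_lt.1 h2)
              subst this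
              simp [h1]
        · by_cases h3 : b < a
          · simp [h1, h3] at hxy
          · have hab : a = b := le_antisymm (not_lt.1 h3) (not_lt.1 h1)
            subst hab
            simp only [lt_irrefl, if_false] at hxy
            by_cases h2 : a < c
            · simp [h2]
            · by_cases h4 : c < a
              · simp [h2, h4] at hyz
              · have : a = c := le_antisymm (not_lt.1 h4) (not_lt.1 h2)
                subst this
                simp only [lt_irrefl, if_false] at hyz ⊢
                exact ih hxy hyz

theorem pvLt_total : ∀ {x y : List Char}, x ≠ y → pvLt x y = true ∨ pvLt y x = true := by
  intro x
  induction x with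
  | nil =>
    intro y h
    cases y with
    | nil => exact absurd rfl h
    | cons b y => left; rfl
  | cons a x ih =>
    intro y h
    cases y with
    | nil => right; rfl
    | cons b y =>
      rcases lt_trichotomy a b with h1 | h1 | h1
      · left; simp [pvLt, h1]
      · subst h1
        have hxy : x ≠ y := by intro he; exact h (by rw [he])
        rcases ih hxy with h2 | h2
        · left; simp [pvLt, h2]
        · right; simp [pvLt, h2]
      · right; simp [pvLt, h1]

theorem pvLt_asymm {x y : List Char} (h : pvLt x y = true) : pvLt y x = false := by
  by_contra hc
  have hyx : pvLt y x = true := by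
    cases hxy : pvLt y x
    · exact absurd hxy hc
    · rfl
  have := pvLt_trans h hyx
  rw [pvLt_irrefl] at this
  exact Bool.false_ne_true this

theorem pvDrop_inj {w : List Char} {s t : Nat} (hs : s < w.length)
    (h : w.drop s = w.drop t) : s = t := by
  have := congrArg List.length h
  simp [List.length_drop] at this
  omega

theorem pvLt_shift (w : List Char) (t : Nat) : ∀ p q : Nat, p + t ≤ w.length → q + t ≤ w.length →
    (∀ u, u < t → pvGd w (p+u) = pvGd w (q+u)) →
    pvLt (w.drop p) (w.drop q) = pvLt (w.drop (p+t)) (w.drop (q+t)) := by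
  induction t with
  | zero => intro p q _ _ _; rfl
  | succ t ih =>
    intro p q hp hq hm
    have hp0 : p < w.length := by omega
    have hq0 : q < w.length := by omega
    rw [pvDrop_cons hp0, pvDrop_cons hq0]
    have h0 : pvGd w p = pvGd w q := by
      have := hm 0 (by omega); simpa using this
    have := ih (p+1) (q+1) (by omega) (by omega)
      (fun u hu => by
        have := hm (u+1) (by omega)
        simpa [Nat.add_assoc, Nat.add_comm 1 u] using this)
    have b1 : p+1+t = p+(t+1) := by omega
    have b2 : q+1+t = q+(t+1) := by omega
    rw [b1, b2] at this
    simp only [pvLt, h0, lt_irrefl, if_false]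
    exact this

theorem pvLt_head {w : List Char} {p q : Nat} (hp : p < w.length) (hq : q < w.length)
    (h : pvGd w p < pvGd w q) : pvLt (w.drop p) (w.drop q) = true := by
  rw [pvDrop_cons hp, pvDrop_cons hq]
  simp [pvLt, h]

theorem pvLt_first_diff {w : List Char} {p q t : Nat}
    (hm : ∀ u, u < t → pvGd w (p+u) = pvGd w (q+u))
    (hp : p + t < w.length) (hq : q + t < w.length)
    (h : pvGd w (p+t) < pvGd w (q+t)) : pvLt (w.drop p) (w.drop q) = true := by
  rw [pvLt_shift w t p q (by omega) (by omega) hm]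
  exact pvLt_head hp hq h

theorem pvLt_prefix_end {w : List Char} {p q : Nat} (hq : q < p) (hp : p ≤ w.length)
    (hm : ∀ u, p + u < w.length → pvGd w (p+u) = pvGd w (q+u)) :
    pvLt (w.drop p) (w.drop q) = true := by
  have h1 := pvLt_shift w (w.length - p) p q (by omega) (by omega)
    (fun u hu => hm u (by omega))
  rw [h1]
  have h2 : w.drop (p + (w.length - p)) = [] := List.drop_of_length_le (by omega)
  have h3 : w.drop (q + (w.length - p)) ≠ [] := by
    apply List.ne_nil_of_length_pos
    rw [List.length_drop]; omega
  rw [h2]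
  exact pvLt_nil_left h3

-- a position whose predecessor holds the same character is never the maximal suffix start
theorem pvNotMax_rep {w : List Char} {s : Nat} (h1 : 1 ≤ s) (h2 : s < w.length)
    (h3 : pvGd w (s-1) = pvGd w s) : ∃ t, t < w.length ∧ pvLt (w.drop s) (w.drop t) = true := by
  have hne : w.drop s ≠ w.drop (s-1) := fun he => by have := pvDrop_inj h2 he; omega
  rcases pvLt_total hne with h | h
  · exact ⟨s-1, by omega, h⟩
  · have hs1 : s - 1 < w.length := by omega
    rw [pvDrop_cons hs1] at h
    have hss : s - 1 + 1 = s := by omega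
    rw [hss] at h
    rw [pvDrop_cons h2] at h
    simp only [pvLt, h3, lt_irrefl, if_false] at h
    rw [← pvDrop_cons h2] at h
    have hsn : s + 1 < w.length := by
      by_contra hn
      have : w.drop (s+1) = [] := List.drop_of_length_le (by omega)
      rw [this, pvLt_nil_right] at h
      exact Bool.false_ne_true h
    exact ⟨s+1, hsn, h⟩

theorem pvExistsMax {w : List Char} (h : w ≠ []) : ∃ s, pvIsMax w s := by
  have hn : 1 ≤ w.length := by
    cases w with
    | nil => exact absurd rfl h
    | cons a x => simp
  have aux : ∀ k, 1 ≤ k → k ≤ w.length →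
      ∃ s, s < k ∧ ∀ t, t < k → pvLt (w.drop s) (w.drop t) = false := by
    intro k
    induction k with
    | zero => omega
    | succ k ih =>
      intro _ hk
      by_cases hk1 : 1 ≤ k
      · obtain ⟨s, hs, hall⟩ := ih hk1 (by omega)
        cases hlt : pvLt (w.drop s) (w.drop k)
        · exact ⟨s, by omega, fun t ht => by
            rcases Nat.lt_or_ge t k with h' | h'
            · exact hall t h'
            · have : t = k := by omega
              rw [this]; exact hlt⟩
        · refine ⟨k, by omega, fun t ht => ?_⟩
          rcases Nat.lt_or_ge t k with h' | h'
          · by_contra hc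
            have hkt : pvLt (w.drop k) (w.drop t) = true := by
              cases hx : pvLt (w.drop k) (w.drop t)
              · exact absurd hx hc
              · rfl
            have := pvLt_trans hlt hkt
            rw [hall t h'] at this
            exact Bool.false_ne_true this
          · have : t = k := by omega
            rw [this]; exact pvLt_irrefl _
      · refine ⟨0, by omega, fun t ht => ?_⟩
        have : t = 0 := by omega
        rw [this]; exact pvLt_irrefl _
  obtain ⟨s, hs, hall⟩ := aux w.length hn le_rfl
  exact ⟨s, hs, hall⟩

theorem pvNotMax_of_beats {w : List Char} {s t : Nat} (ht : t < w.length)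
    (h : pvLt (w.drop s) (w.drop t) = true) : ¬ pvIsMax w s := by
  intro hm
  rw [hm.2 t ht] at h
  exact Bool.false_ne_true h

-- ===== invariant of A's outer loop =====
structure PvInvA (w : List Char) (r i m c : Nat) (e : Bool) : Prop where
  h1 : r < i
  h2 : i ≤ w.length
  h3 : 1 ≤ m
  h4 : c ≤ m
  h5 : r + m ≤ i
  h6 : ∀ s, s < i → pvGd w s ≤ pvGd w r
  h7 : ∀ t, t < m → pvGd w (r+t) = pvGd w r
  hE : e = true → i = r + m
  hN : e = false → ((r + m < i ∧ pvGd w (r+m) ≠ pvGd w r) ∨ (r + m = i ∧ c = m))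
  hR : e = false → ∀ t, t < c → pvGd w (i - c + t) = pvGd w r
  h9 : ∀ s, s + c < i → s ≠ r → ¬ pvIsMax w s
  h10 : e = false → c = m → pvLt (w.drop (r+m)) (w.drop i) = false

-- ===== invariant of B's loop =====
structure PvInvB (w : List Char) (i j k : Nat) : Prop where
  b1 : i < j
  b2 : ∀ t, t < k → pvGd w (i+t) = pvGd w (j+t)
  b3 : ∀ s, s < j → s ≠ i → ¬ pvIsMax w s

theorem pvA_init {w : List Char} (h : 1 ≤ w.length) : PvInvA w 0 1 1 1 true := by
  refine ⟨by omega, h, le_rfl, le_rfl, by omega, ?_, ?_, fun _ => rfl, ?_, ?_, ?_, ?_⟩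
  · intro s hs; have : s = 0 := by omega
    rw [this]
  · intro t ht; have : t = 0 := by omega
    rw [this]
  · intro hf; cases hf
  · intro hf; cases hf
  · intro s hs _; omega
  · intro hf; cases hf

theorem pvB_init (w : List Char) : PvInvB w 0 1 0 :=
  ⟨by omega, fun t ht => by omega, fun s hs hne => by omega⟩

-- A's state never leaves out the maximal suffix: at loop exit (i = n) the candidate wins.
theorem pvA_exit {w : List Char} {r m c : Nat} {e : Bool} (hI : PvInvA w r w.length m c e)
    {β : Nat} (hβ : pvIsMax w β) : β = r := by
  set n := w.length with hn
  by_contra hne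
  have hβn := hβ.1
  rcases Nat.lt_or_ge (β + c) n with hlt | hge
  · exact (hI.h9 β hlt hne) hβ
  · -- β ∈ [n - c, n)
    have hc1 : 1 ≤ c := by omega
    cases e with
    | true =>
      have hieq := hI.hE rfl
      -- β > r (β ≥ n - c ≥ n - m = r, β ≠ r), all of [r, n) is one run
      have hβr : r < β := by
        have := hI.h4; omega
      have hrep : pvGd w (β-1) = pvGd w β := by
        have e1 := hI.h7 (β-1-r) (by omega)
        have e2 := hI.h7 (β-r) (by omega)
        have b1 : r + (β-1-r) = β-1 := by omega
        have b2 : r + (β-r) = β := by omega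
        rw [b1] at e1; rw [b2] at e2; rw [e1, e2]
      obtain ⟨t, ht, hbt⟩ := pvNotMax_rep (by omega) hβn hrep
      exact (pvNotMax_of_beats ht hbt) hβ
    | false =>
      have hRun := hI.hR rfl
      rcases Nat.lt_or_ge (n - c) β with hgt | hle
      · -- strictly inside the trailing run
        have hrep : pvGd w (β-1) = pvGd w β := by
          have e1 := hRun (β-1-(n-c)) (by omega)
          have e2 := hRun (β-(n-c)) (by omega)
          have b1 : n - c + (β-1-(n-c)) = β-1 := by omega
          have b2 : n - c + (β-(n-c)) = β := by omega
          rw [b1] at e1; rw [b2] at e2; rw [e1, e2]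
        obtain ⟨t, ht, hbt⟩ := pvNotMax_rep (by omega) hβn hrep
        exact (pvNotMax_of_beats ht hbt) hβ
      · have hβeq : β = n - c := by omega
        rcases hI.hN rfl with ⟨hlt2, _⟩ | ⟨heq2, hcm⟩
        · -- β's suffix is a proper prefix of r's: w.drop β = M^c, with r+c < n
          have hbeats : pvLt (w.drop β) (w.drop r) = true := by
            have h1 := pvLt_shift w c β r (by have h4 := hI.h4; have h5 := hI.h5; omega)
              (by have h4 := hI.h4; have h5 := hI.h5; omega)
              (fun u hu => by
                have e1 := hRun u hu
                have e2 := hI.h7 u (by have h4 := hI.h4; omega)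
                rw [hβeq]
                rw [e1, e2])
            rw [h1]
            have h2 : w.drop (β + c) = [] := List.drop_of_length_le (by omega)
            rw [h2]
            apply pvLt_nil_left
            apply List.ne_nil_of_length_pos
            rw [List.length_drop]
            have h4 := hI.h4; have h5 := hI.h5; omega
          exact (pvNotMax_of_beats (by omega : r < n) hbeats) hβ
        · -- r + m = n and c = m: β = n - c = r, contradiction
          omega

-- B at loop exit: the candidate i is the maximal suffix start.
theorem pvB_exit {w : List Char} {i j k : Nat} (hI : PvInvB w i j k)
    (hjk : w.length ≤ j + k) {β : Nat} (hβ : pvIsMax w β) : β = i := by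
  set n := w.length with hn
  by_contra hne
  have hβn := hβ.1
  rcases Nat.lt_or_ge β j with hlt | hge
  · exact (hI.b3 β hlt hne) hβ
  · -- β ∈ [j, n): its suffix is a proper prefix of the one at i + (β - j)
    have hbeats : pvLt (w.drop β) (w.drop (i + (β - j))) = true := by
      apply pvLt_prefix_end (by have := hI.b1; omega) (by omega)
      intro u hu
      have h2 := hI.b2 (β - j + u) (by omega)
      have b1 : i + (β - j) + u = i + (β - j + u) := by omega
      have b2 : β + u = j + (β - j + u) := by omega
      rw [← b2] at h2
      rw [← b1] at h2
      exact h2.symm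
    exact (pvNotMax_of_beats (by have := hI.b1; omega : i + (β - j) < n) hbeats) hβ

-- ===== invariant preservation, A =====
theorem pvInvA_lt {w : List Char} {r i m c : Nat} {e : Bool} (hI : PvInvA w r i m c e)
    (hi : i < w.length) (h : pvGd w r < pvGd w i) : PvInvA w i (i+1) 1 0 true := by
  refine ⟨by omega, by omega, le_rfl, by omega, by omega, ?_, ?_, fun _ => rfl,
    ?_, ?_, ?_, ?_⟩
  · intro s hs
    rcases Nat.lt_or_ge s i with h' | h'
    · exact le_of_lt (lt_of_le_of_lt (hI.h6 s h') h)
    · have : s = i := by omega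
      rw [this]
  · intro t ht; have : t = 0 := by omega
    rw [this]; simp
  · intro hf; cases hf
  · intro hf; cases hf
  · intro s hs hne
    have hs' : s < i := by omega
    exact pvNotMax_of_beats (t := i) hi
      (pvLt_head (p := s) (q := i) (by omega) hi (lt_of_le_of_lt (hI.h6 s hs') h))
  · intro hf; cases hf

theorem pvInvA_gt {w : List Char} {r i m c : Nat} {e : Bool} (hI : PvInvA w r i m c e)
    (hi : i < w.length) (h : pvGd w i < pvGd w r) : PvInvA w r (i+1) m 0 false := by
  have h5 := hI.h5
  have hmM : pvGd w (r+m) ≠ pvGd w r := by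
    rcases Nat.lt_or_ge (r+m) i with h' | h'
    · cases e with
      | true => have := hI.hE rfl; omega
      | false =>
        rcases hI.hN rfl with ⟨_, hne⟩ | ⟨heq, _⟩
        · exact hne
        · omega
    · have : r + m = i := by omega
      rw [this]; exact ne_of_lt h
  refine ⟨by have := hI.h1; omega, by omega, hI.h3, by omega, by omega, ?_, hI.h7, ?_, ?_, ?_, ?_, ?_⟩
  · intro s hs
    rcases Nat.lt_or_ge s i with h' | h'
    · exact hI.h6 s h'
    · have : s = i := by omega
      rw [this]; exact le_of_lt h
  · intro hf; cases hf
  · intro _; left; exact ⟨by omega, hmM⟩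
  · intro _ t ht; omega
  · intro s hs hne
    rcases Nat.lt_or_ge (s + c) i with hold | hnew
    · exact hI.h9 s hold hne
    · -- s ∈ [i - c, i]
      rcases Nat.lt_or_ge s i with hsi | hsi
      · cases e with
        | true =>
          -- s strictly inside the leading run [r, i)
          have hieq := hI.hE rfl
          have hsr : r < s := by have := hI.h4; omega
          have hrep : pvGd w (s-1) = pvGd w s := by
            have e1 := hI.h7 (s-1-r) (by omega)
            have e2 := hI.h7 (s-r) (by omega)
            have b1 : r + (s-1-r) = s-1 := by omega
            have b2 : r + (s-r) = s := by omega
            rw [b1] at e1; rw [b2] at e2; rw [e1, e2]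
          obtain ⟨t, ht, hbt⟩ := pvNotMax_rep (by omega) (by omega) hrep
          exact pvNotMax_of_beats ht hbt
        | false =>
          have hRun := hI.hR rfl
          have hc1 : 1 ≤ c := by omega
          rcases Nat.lt_or_ge (i - c) s with hin | hbd
          · -- strictly inside the trailing run
            have hrep : pvGd w (s-1) = pvGd w s := by
              have e1 := hRun (s-1-(i-c)) (by omega)
              have e2 := hRun (s-(i-c)) (by omega)
              have b1 : i - c + (s-1-(i-c)) = s-1 := by omega
              have b2 : i - c + (s-(i-c)) = s := by omega
              rw [b1] at e1; rw [b2] at e2; rw [e1, e2]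
            obtain ⟨t, ht, hbt⟩ := pvNotMax_rep (by omega) (by omega) hrep
            exact pvNotMax_of_beats ht hbt
          · have hseq : s = i - c := by omega
            rcases hI.hN rfl with ⟨hlt2, hne2⟩ | ⟨heq2, hcm⟩
            · rcases Nat.lt_or_ge c m with hcm | hcm
              · -- first difference at offset c: w[i] < M = w[r+c]
                have hbt : pvLt (w.drop s) (w.drop r) = true := by
                  apply pvLt_first_diff (t := c)
                    (fun u hu => by
                      have e1 := hRun u hu
                      have e2 := hI.h7 u (by omega)
                      rw [hseq, e1, e2])
                    (by omega) (by omega)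
                  have b1 : s + c = i := by omega
                  have e2 := hI.h7 c hcm
                  rw [b1, e2]
                  exact h
                exact pvNotMax_of_beats (by omega) hbt
              · have hceq : c = m := by have := hI.h4; omega
                -- use h10: w.drop i ≤ w.drop (r+m), strict since lengths differ
                have h10 := hI.h10 rfl hceq
                have hneq : w.drop i ≠ w.drop (r+m) := by
                  intro he
                  have := pvDrop_inj hi he
                  omega
                have hlt3 : pvLt (w.drop i) (w.drop (r+m)) = true := by
                  rcases pvLt_total hneq with h' | h'
                  · exact h'
                  · rw [h10] at h'; exact absurd h' (by simp)
                have hbt : pvLt (w.drop s) (w.drop r) = true := by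
                  have hsh := pvLt_shift w c s r (by omega) (by omega)
                    (fun u hu => by
                      have e1 := hRun u hu
                      have e2 := hI.h7 u (by omega)
                      rw [hseq, e1, e2])
                  rw [hsh]
                  have b1 : s + c = i := by omega
                  have b2 : r + c = r + m := by omega
                  rw [b1, b2]
                  exact hlt3
                exact pvNotMax_of_beats (by omega) hbt
            · -- r + m = i ∧ c = m : s = i - c = r, excluded
              omega
      · have hseq : s = i := by omega
        exact pvNotMax_of_beats (t := r) (by omega)
          (pvLt_head (p := s) (q := r) (by omega) (by omega) (by rw [hseq]; exact h))
  · intro _ hc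
    have := hI.h3; omega

theorem pvInvA_eqE {w : List Char} {r i m c : Nat} (hI : PvInvA w r i m c true)
    (hi : i < w.length) (h : pvGd w r = pvGd w i) : PvInvA w r (i+1) (m+1) (c+1) true := by
  have hieq := hI.hE rfl
  refine ⟨by have := hI.h1; omega, by omega, by omega, by have := hI.h4; omega, by omega, ?_, ?_, fun _ => by omega,
    ?_, ?_, ?_, ?_⟩
  · intro s hs
    rcases Nat.lt_or_ge s i with h' | h'
    · exact hI.h6 s h'
    · have : s = i := by omega
      rw [this, ← h]
  · intro t ht
    rcases Nat.lt_or_ge t m with h' | h'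
    · exact hI.h7 t h'
    · have : t = m := by omega
      rw [this]
      have : r + m = i := by omega
      rw [this, ← h]
  · intro hf; cases hf
  · intro hf; cases hf
  · intro s hs hne
    exact hI.h9 s (by omega) hne
  · intro hf; cases hf

theorem pvInvA_eqN_cont {w : List Char} {r i m c : Nat} (hI : PvInvA w r i m c false)
    (hi : i < w.length) (h : pvGd w r = pvGd w i) (hcm : c + 1 < m) :
    PvInvA w r (i+1) m (c+1) false := by
  have hN : r + m < i ∧ pvGd w (r+m) ≠ pvGd w r := by
    rcases hI.hN rfl with h' | ⟨_, hceq⟩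
    · exact h'
    · omega
  refine ⟨by have := hI.h1; omega, by omega, hI.h3, by omega, by omega, ?_, hI.h7, ?_, ?_, ?_, ?_, ?_⟩
  · intro s hs
    rcases Nat.lt_or_ge s i with h' | h'
    · exact hI.h6 s h'
    · have : s = i := by omega
      rw [this, ← h]
  · intro hf; cases hf
  · intro _; left; exact ⟨by omega, hN.2⟩
  · intro _ t ht
    have hb : i + 1 - (c+1) = i - c := by omega
    rw [hb]
    rcases Nat.lt_or_ge t c with h' | h'
    · exact hI.hR rfl t h'
    · have : t = c := by omega
      rw [this]
      have : i - c + c = i := by omega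
      rw [this, ← h]
  · intro s hs hne
    exact hI.h9 s (by omega) hne
  · intro _ hc; omega

-- after the inner loop breaks keeping r ('word[j] > word[k]')
theorem pvInvA_keep {w : List Char} {r i m c : Nat} (hI : PvInvA w r i m c false)
    (hi : i < w.length) (h : pvGd w r = pvGd w i) (hcm : c + 1 = m)
    (hwin : pvLt (w.drop (i+1)) (w.drop (r+m)) = true) :
    PvInvA w r (i+1) m (c+1) false := by
  have hN : r + m < i ∧ pvGd w (r+m) ≠ pvGd w r := by
    rcases hI.hN rfl with h' | ⟨_, hceq⟩
    · exact h'
    · omega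
  refine ⟨by have := hI.h1; omega, by omega, hI.h3, by omega, by omega, ?_, hI.h7, ?_, ?_, ?_, ?_, ?_⟩
  · intro s hs
    rcases Nat.lt_or_ge s i with h' | h'
    · exact hI.h6 s h'
    · have : s = i := by omega
      rw [this, ← h]
  · intro hf; cases hf
  · intro _; left; exact ⟨by omega, hN.2⟩
  · intro _ t ht
    have hb : i + 1 - (c+1) = i - c := by omega
    rw [hb]
    rcases Nat.lt_or_ge t c with h' | h'
    · exact hI.hR rfl t h'
    · have : t = c := by omega
      rw [this]
      have : i - c + c = i := by omega
      rw [this, ← h]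
  · intro s hs hne
    exact hI.h9 s (by omega) hne
  · intro _ _
    exact pvLt_asymm hwin

-- after the inner loop breaks taking the challenger ('word[j] < word[k]')
theorem pvInvA_take {w : List Char} {r i m c : Nat} (hI : PvInvA w r i m c false)
    (hi : i < w.length) (h : pvGd w r = pvGd w i) (hcm : c + 1 = m)
    (hwin : pvLt (w.drop (r+m)) (w.drop (i+1)) = true) :
    PvInvA w ((i+1) - (c+1)) (i+1) m (c+1) false := by
  have hN : r + m < i ∧ pvGd w (r+m) ≠ pvGd w r := by
    rcases hI.hN rfl with h' | ⟨_, hceq⟩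
    · exact h'
    · omega
  have hRun := hI.hR rfl
  set r' := (i+1) - (c+1) with hr'
  have hr'' : r' = i - c := by omega
  have hrr : r + m < r' + m := by omega
  -- the c+1 = m characters w[i-c..i] all equal M
  have hrun' : ∀ t, t < m → pvGd w (r' + t) = pvGd w r := by
    intro t ht
    rcases Nat.lt_or_ge t c with h' | h'
    · rw [hr'']; exact hRun t h'
    · have : t = c := by omega
      rw [this, hr'']
      have : i - c + c = i := by omega
      rw [this, ← h]
  have hMr' : pvGd w r' = pvGd w r := by
    have := hrun' 0 (by have := hI.h3; omega)
    simpa using this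
  refine ⟨by omega, by omega, hI.h3, by omega, by omega, ?_, ?_, ?_, ?_, ?_, ?_, ?_⟩
  · intro s hs
    rw [hMr']
    rcases Nat.lt_or_ge s i with h' | h'
    · exact hI.h6 s h'
    · have : s = i := by omega
      rw [this, ← h]
  · intro t ht
    rw [hMr']
    exact hrun' t ht
  · intro hf; cases hf
  · intro _; right; exact ⟨by omega, hcm⟩
  · intro _ t ht
    have hb : i + 1 - (c+1) = r' := by omega
    rw [hb, hMr']
    exact hrun' t (by omega)
  · intro s hs hne
    have hs' : s < i - c := by omega
    by_cases hsr : s = r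
    · -- the old candidate r itself is beaten by r'
      subst hsr
      have hbt : pvLt (w.drop s) (w.drop r') = true := by
        have hsh := pvLt_shift w m s r' (by omega) (by omega)
          (fun u hu => by rw [hrun' u hu, hI.h7 u hu])
        rw [hsh]
        have : r' + m = i + 1 := by omega
        rw [this]
        exact hwin
      exact pvNotMax_of_beats (by omega) hbt
    · exact hI.h9 s (by omega) hsr
  · intro _ _
    have : r' + m = i + 1 := by omega
    rw [this]
    exact pvLt_irrefl _

-- the c+1 > m branch: a longer run wins outright, expansion restarts
theorem pvInvA_grow {w : List Char} {r i m c : Nat} (hI : PvInvA w r i m c false)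
    (hi : i < w.length) (h : pvGd w r = pvGd w i) (hcm : m < c + 1) :
    PvInvA w ((i+1) - (c+1)) (((i+1) - (c+1)) + (c+1)) (c+1) 0 true := by
  have hceq : c = m := by have := hI.h4; omega
  have hRun := hI.hR rfl
  set r' := (i+1) - (c+1) with hr'
  have hr'' : r' = i - c := by omega
  -- all of w[r'..i] is one run of M of length c+1 = m+1
  have hrun' : ∀ t, t < c + 1 → pvGd w (r' + t) = pvGd w r := by
    intro t ht
    rcases Nat.lt_or_ge t c with h' | h'
    · rw [hr'']; exact hRun t h'
    · have : t = c := by omega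
      rw [this, hr'']
      have : i - c + c = i := by have h4 := hI.h4; have h5 := hI.h5; omega
      rw [this, ← h]
  have hMr' : pvGd w r' = pvGd w r := by
    have := hrun' 0 (by omega)
    simpa using this
  have hieq : r' + (c+1) = i + 1 := by have h4 := hI.h4; have h5 := hI.h5; omega
  refine ⟨by omega, by omega, by omega, by omega, by omega, ?_, ?_, fun _ => rfl, ?_, ?_, ?_, ?_⟩
  · intro s hs
    rw [hMr']
    rcases Nat.lt_or_ge s i with h' | h'
    · exact hI.h6 s h'
    · have : s = i := by omega
      rw [this, ← h]
  · intro t ht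
    rw [hMr']
    exact hrun' t ht
  · intro hf; cases hf
  · intro hf; cases hf
  · intro s hs hne
    rw [hieq] at hs
    rcases hI.hN rfl with ⟨hlt2, hne2⟩ | ⟨heq2, _⟩
    · -- r + m < i, w[r+m] ≠ M; r' = i - m > r
      have hrr' : r < r' := by omega
      rcases Nat.lt_or_ge s r' with hs' | hs'
      · by_cases hsr : s = r
        · subst hsr
          -- r is beaten by r': first difference at offset m, w[r+m] < M = w[r'+m]
          have hbt : pvLt (w.drop s) (w.drop r') = true := by
            apply pvLt_first_diff (t := m)
              (fun u hu => by rw [hrun' u (by omega), hI.h7 u hu])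
              (by omega) (by omega)
            have e2 := hrun' m (by omega)
            rw [e2]
            have hle := hI.h6 (s+m) (by omega)
            exact lt_of_le_of_ne hle hne2
          exact pvNotMax_of_beats (by omega) hbt
        · exact hI.h9 s (by omega) hsr
      · -- s ∈ (r', i]: strictly inside the run
        have hin : r' < s := by omega
        have hrep : pvGd w (s-1) = pvGd w s := by
          have e1 := hrun' (s-1-r') (by omega)
          have e2 := hrun' (s-r') (by omega)
          have b1 : r' + (s-1-r') = s-1 := by omega
          have b2 : r' + (s-r') = s := by omega
          rw [b1] at e1; rw [b2] at e2; rw [e1, e2]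
        obtain ⟨t, ht, hbt⟩ := pvNotMax_rep (by omega) (by omega) hrep
        exact pvNotMax_of_beats ht hbt
    · -- r + m = i ∧ c = m: r' = i - c = r
      have hrr' : r' = r := by omega
      rcases Nat.lt_or_ge s r' with hs' | hs'
      · exact hI.h9 s (by omega) (by omega)
      · have hin : r' < s := by omega
        have hrep : pvGd w (s-1) = pvGd w s := by
          have e1 := hrun' (s-1-r') (by omega)
          have e2 := hrun' (s-r') (by omega)
          have b1 : r' + (s-1-r') = s-1 := by omega
          have b2 : r' + (s-r') = s := by omega
          rw [b1] at e1; rw [b2] at e2; rw [e1, e2]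
        obtain ⟨t, ht, hbt⟩ := pvNotMax_rep (by omega) (by omega) hrep
        exact pvNotMax_of_beats ht hbt
  · intro hf; cases hf

-- spec of the inner comparison loop, entered at offset t with the first t characters matched
theorem pvInnerA_spec {w : List Char} {r c' i' m : Nat} (hm1 : 1 ≤ m) (hrm : r + m < i')
    (hi : i' ≤ w.length) :
    ∀ d t, w.length - (i' + t) ≤ d →
    (∀ u, u < t → pvGd w (r+m+u) = pvGd w (i'+u)) →
    (pvInnerA w r c' i' (r+m-1+t) (i'-1+t) d = none ∧
       ∀ u, i' + u < w.length → pvGd w (r+m+u) = pvGd w (i'+u))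
    ∨ (pvInnerA w r c' i' (r+m-1+t) (i'-1+t) d = some r ∧
       pvLt (w.drop i') (w.drop (r+m)) = true)
    ∨ (pvInnerA w r c' i' (r+m-1+t) (i'-1+t) d = some (i' - c') ∧
       pvLt (w.drop (r+m)) (w.drop i') = true) := by
  intro d
  induction d with
  | zero =>
    intro t hd hmt
    left
    refine ⟨rfl, fun u hu => hmt u (by omega)⟩
  | succ d ih =>
    intro t hd hmt
    rw [pvInnerA]
    have hj : r + m - 1 + t + 1 = r + m + t := by omega
    have hk : i' - 1 + t + 1 = i' + t := by omega
    by_cases hend : w.length ≤ i' - 1 + t + 1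
    · rw [if_pos hend]
      left
      refine ⟨rfl, fun u hu => hmt u (by omega)⟩
    · rw [if_neg hend]
      rw [hj, hk]
      have hkn : i' + t < w.length := by omega
      have hjn : r + m + t < w.length := by omega
      by_cases h1 : pvGd w (i'+t) < pvGd w (r+m+t)
      · rw [if_pos h1]
        right; left
        constructor
        · rfl
        · exact pvLt_first_diff (fun u hu => (hmt u hu).symm) hkn hjn h1
      · rw [if_neg h1]
        by_cases h2 : pvGd w (r+m+t) < pvGd w (i'+t)
        · rw [if_pos h2]
          right; right
          constructor
          · rfl
          · exact pvLt_first_diff hmt hjn hkn h2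
        · rw [if_neg h2]
          have heq : pvGd w (r+m+t) = pvGd w (i'+t) := le_antisymm (not_lt.1 h1) (not_lt.1 h2)
          have := ih (t+1) (by omega)
            (fun u hu => by
              rcases Nat.lt_or_ge u t with h' | h'
              · exact hmt u h'
              · have : u = t := by omega
                rw [this]; exact heq)
          have hj2 : r + m - 1 + (t+1) = r + m + t := by omega
          have hk2 : i' - 1 + (t+1) = i' + t := by omega
          rw [hj2, hk2] at this
          exact this

-- early return inside the inner loop: everything from i'=i+1 on repeats earlier content, r wins.
theorem pvA_early {w : List Char} {r i m c : Nat} (hI : PvInvA w r i m c false)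
    (hi : i < w.length) (h : pvGd w r = pvGd w i) (hcm : c + 1 = m)
    (hmatch : ∀ u, (i+1) + u < w.length → pvGd w (r+m+u) = pvGd w ((i+1)+u))
    {β : Nat} (hβ : pvIsMax w β) : β = r := by
  set n := w.length with hn
  have hN : r + m < i ∧ pvGd w (r+m) ≠ pvGd w r := by
    rcases hI.hN rfl with h' | ⟨_, hceq⟩
    · exact h'
    · omega
  have hRun := hI.hR rfl
  set i' := i + 1 with hi'
  -- the full run w[i-c..i] of length m
  have hrun' : ∀ t, t < m → pvGd w (i - c + t) = pvGd w r := by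
    intro t ht
    rcases Nat.lt_or_ge t c with h' | h'
    · exact hRun t h'
    · have : t = c := by omega
      rw [this]
      have : i - c + c = i := by omega
      rw [this, ← h]
  by_contra hne
  have hβn := hβ.1
  rcases Nat.lt_or_ge β (i - c) with hb1 | hb1
  · exact (hI.h9 β (by omega) hne) hβ
  · rcases Nat.lt_or_ge β i' with hb2 | hb2
    · -- β in [i-c, i]
      rcases Nat.lt_or_ge (i - c) β with hb3 | hb3
      · -- strictly inside the run
        have hrep : pvGd w (β-1) = pvGd w β := by
          have e1 := hrun' (β-1-(i-c)) (by omega)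
          have e2 := hrun' (β-(i-c)) (by omega)
          have b1 : i - c + (β-1-(i-c)) = β-1 := by omega
          have b2 : i - c + (β-(i-c)) = β := by omega
          rw [b1] at e1; rw [b2] at e2; rw [e1, e2]
        obtain ⟨t, ht, hbt⟩ := pvNotMax_rep (by omega) (by omega) hrep
        exact (pvNotMax_of_beats ht hbt) hβ
      · -- β = i - c: proper-prefix comparison after the matched run
        have hβeq : β = i - c := by omega
        have hbt : pvLt (w.drop β) (w.drop r) = true := by
          have hsh := pvLt_shift w m β r (by omega) (by omega)
            (fun u hu => by
              rw [hβeq]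
              rw [hrun' u hu, hI.h7 u hu])
          rw [hsh]
          have b1 : β + m = i' := by omega
          rw [b1]
          exact pvLt_prefix_end (by omega) (by omega)
            (fun u hu => (hmatch u (by omega)).symm)
        exact (pvNotMax_of_beats (by omega) hbt) hβ
    · -- β ≥ i' = i+1: suffix repeats d = i' - (r+m) positions earlier, proper prefix
      have hd1 : 1 ≤ i' - (r+m) := by omega
      have hglobal : ∀ x, i' ≤ x → x < n → pvGd w x = pvGd w (x - (i' - (r+m))) := by
        intro x hx1 hx2
        have := hmatch (x - i') (by omega)
        have b1 : r + m + (x - i') = x - (i' - (r+m)) := by omega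
        have b2 : i' + (x - i') = x := by omega
        rw [b1, b2] at this
        exact this.symm
      have hbt : pvLt (w.drop β) (w.drop (β - (i' - (r+m)))) = true := by
        apply pvLt_prefix_end (by omega) (by omega)
        intro u hu
        have := hglobal (β + u) (by omega) hu
        have b1 : β + u - (i' - (r+m)) = β - (i' - (r+m)) + u := by omega
        rw [b1] at this
        exact this
      exact (pvNotMax_of_beats (by omega) hbt) hβ

-- ===== main lemma, A =====
theorem pvLoopA_eq {w : List Char} {β : Nat} (hβ : pvIsMax w β) :
    ∀ d r i m c e, w.length - i ≤ d → PvInvA w r i m c e → pvLoopA w r i m c e d = β := by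
  intro d
  induction d with
  | zero =>
    intro r i m c e hd hI
    have hieq : i = w.length := by have := hI.h2; omega
    subst hieq
    exact (pvA_exit hI hβ).symm
  | succ d ih =>
    intro r i m c e hd hI
    by_cases hin : i < w.length
    · rw [pvLoopA, if_pos hin]
      by_cases h1 : pvGd w r < pvGd w i
      · rw [if_pos h1]
        exact ih _ _ _ _ _ (by omega) (pvInvA_lt hI hin h1)
      · rw [if_neg h1]
        by_cases h2 : pvGd w i < pvGd w r
        · rw [if_pos h2]
          exact ih _ _ _ _ _ (by omega) (pvInvA_gt hI hin h2)
        · rw [if_neg h2]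
          have heq : pvGd w r = pvGd w i := le_antisymm (not_lt.1 h2) (not_lt.1 h1)
          cases e with
          | true =>
            rw [if_pos rfl]
            exact ih _ _ _ _ _ (by omega) (pvInvA_eqE hI hin heq)
          | false =>
            rw [if_neg (by simp)]
            by_cases h3 : c + 1 = m
            · rw [if_pos h3]
              have hN : r + m < i ∧ pvGd w (r+m) ≠ pvGd w r := by
                rcases hI.hN rfl with h' | ⟨_, hceq⟩
                · exact h'
                · omega
              have hspec := pvInnerA_spec (w := w) (r := r) (c' := c+1) (i' := i+1)
                (m := m) hI.h3 (by omega) (by omega) (w.length) 0 (by omega) (by omega)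
              have hargs : i + 1 - 1 = i := by omega
              rcases hspec with ⟨hres, hmt⟩ | ⟨hres, hwin⟩ | ⟨hres, hwin⟩
              · rw [show r + m - 1 + 0 = r + m - 1 by omega, show i + 1 - 1 + 0 = i by omega] at hres
                rw [hres]
                exact (pvA_early hI hin heq h3 (fun u hu => hmt u hu) hβ).symm
              · rw [show r + m - 1 + 0 = r + m - 1 by omega, show i + 1 - 1 + 0 = i by omega] at hres
                rw [hres]
                exact ih _ _ _ _ _ (by omega) (pvInvA_keep hI hin heq h3 hwin)
              · rw [show r + m - 1 + 0 = r + m - 1 by omega, show i + 1 - 1 + 0 = i by omega] at hres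
                rw [hres]
                exact ih _ _ _ _ _ (by omega) (pvInvA_take hI hin heq h3 hwin)
            · rw [if_neg h3]
              by_cases h4 : m < c + 1
              · rw [if_pos h4]
                exact ih _ _ _ _ _ (by omega) (pvInvA_grow hI hin heq h4)
              · rw [if_neg h4]
                exact ih _ _ _ _ _ (by omega) (pvInvA_eqN_cont hI hin heq (by omega))
    · rw [pvLoopA, if_neg hin]
      have hieq : i = w.length := by have := hI.h2; omega
      subst hieq
      exact (pvA_exit hI hβ).symm

-- ===== invariant preservation and main lemma, B =====
theorem pvInvB_gt {w : List Char} {i j k : Nat} (hI : PvInvB w i j k)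
    (hik : i + k < w.length) (hjk : j + k < w.length)
    (h : pvGd w (j+k) < pvGd w (i+k)) : PvInvB w i (j+k+1) 0 := by
  refine ⟨by have := hI.b1; omega, fun t ht => by omega, ?_⟩
  intro s hs hne
  rcases Nat.lt_or_ge s j with h' | h'
  · exact hI.b3 s h' hne
  · -- s = j + t, t ≤ k: first difference at offset k - t favours i + t
    have hbt : pvLt (w.drop s) (w.drop (i + (s - j))) = true := by
      apply pvLt_first_diff (t := k - (s - j))
        (fun u hu => by
          have := hI.b2 (s - j + u) (by omega)
          have b1 : s + u = j + (s - j + u) := by omega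
          have b2 : i + (s - j) + u = i + (s - j + u) := by omega
          rw [b1, b2, this])
        (by omega) (by omega)
      have b1 : s + (k - (s - j)) = j + k := by omega
      have b2 : i + (s - j) + (k - (s - j)) = i + k := by omega
      rw [b1, b2]
      exact h
    exact pvNotMax_of_beats (by omega) hbt

theorem pvInvB_lt {w : List Char} {i j k : Nat} (hI : PvInvB w i j k)
    (hik : i + k < w.length) (hjk : j + k < w.length)
    (h : pvGd w (i+k) < pvGd w (j+k)) :
    PvInvB w (if j ≤ i + k + 1 then i+k+1 else j) ((if j ≤ i + k + 1 then i+k+1 else j) + 1) 0 := by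
  have hij := hI.b1
  set i' := if j ≤ i + k + 1 then i+k+1 else j with hi'
  have hi'2 : i' = i+k+1 ∨ (i' = j ∧ i + k + 1 < j) := by
    by_cases hc : j ≤ i + k + 1
    · left; simp [hi', hc]
    · right; constructor
      · simp [hi', hc]
      · omega
  -- every position in [i, i+k] is beaten at offset k - t
  have hkill : ∀ t, t ≤ k → ¬ pvIsMax w (i + t) := by
    intro t ht
    have hbt : pvLt (w.drop (i+t)) (w.drop (j+t)) = true := by
      apply pvLt_first_diff (t := k - t)
        (fun u hu => by
          have := hI.b2 (t + u) (by omega)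
          have b1 : i + t + u = i + (t + u) := by omega
          have b2 : j + t + u = j + (t + u) := by omega
          rw [b1, b2, this])
        (by omega) (by omega)
      have b1 : i + t + (k - t) = i + k := by omega
      have b2 : j + t + (k - t) = j + k := by omega
      rw [b1, b2]
      exact h
    exact pvNotMax_of_beats (by omega) hbt
  refine ⟨by omega, fun t ht => by omega, ?_⟩
  intro s hs hne
  rcases hi'2 with he | ⟨he, hlt2⟩
  · rw [he] at hs hne
    rcases Nat.lt_or_ge s i with h' | h'
    · exact hI.b3 s (by omega) (by omega)
    · exact (by
        have : s = i + (s - i) := by omega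
        rw [this]
        exact hkill (s - i) (by omega))
  · rw [he] at hs hne
    rcases Nat.lt_or_ge s i with h' | h'
    · exact hI.b3 s (by omega) (by omega)
    · rcases Nat.lt_or_ge s (i + k + 1) with h'' | h''
      · exact (by
          have : s = i + (s - i) := by omega
          rw [this]
          exact hkill (s - i) (by omega))
      · exact hI.b3 s (by omega) (by omega)

theorem pvLoopB_eq {w : List Char} {β : Nat} (hβ : pvIsMax w β) :
    ∀ d i j k, 3 * w.length - (i + j + k) ≤ d → PvInvB w i j k → pvLoopB w i j k d = β := by
  intro d
  induction d with
  | zero =>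
    intro i j k hd hI
    have hij := hI.b1
    have hjk : w.length ≤ j + k := by omega
    exact (pvB_exit hI hjk hβ).symm
  | succ d ih =>
    intro i j k hd hI
    have hij := hI.b1
    rw [pvLoopB]
    by_cases hg : i + k < w.length ∧ j + k < w.length
    · rw [if_pos hg]
      obtain ⟨h1, h2⟩ := hg
      by_cases he : pvGd w (i+k) = pvGd w (j+k)
      · rw [if_pos he]
        refine ih _ _ _ (by omega) ⟨hI.b1, ?_, hI.b3⟩
        intro t ht
        rcases Nat.lt_or_ge t k with h' | h'
        · exact hI.b2 t h'
        · have : t = k := by omega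
          rw [this]; exact he
      · rw [if_neg he]
        by_cases hgt : pvGd w (j+k) < pvGd w (i+k)
        · rw [if_pos hgt]
          exact ih _ _ _ (by omega) (pvInvB_gt hI h1 h2 hgt)
        · rw [if_neg hgt]
          have hlt : pvGd w (i+k) < pvGd w (j+k) :=
            lt_of_le_of_ne (not_lt.1 hgt) he
          refine ih _ _ _ ?_ (pvInvB_lt hI h1 h2 hlt)
          by_cases hc : j ≤ i + k + 1 <;> simp [hc] <;> omega
    · rw [if_neg hg]
      have hjk : w.length ≤ j + k := by
        by_contra hc
        exact hg ⟨by omega, by omega⟩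
      exact (pvB_exit hI hjk hβ).symm

-- ===== VERDICT (by name: the statement is the Claim_ definition above) =====
theorem compute_max_prefix_greedy_spec : Claim_equal_compute_max_prefix_greedy := by
  unfold Claim_equal_compute_max_prefix_greedy
  intro word _
  unfold Spec_compute_max_prefix_greedy
  unfold compute_max_prefix_greedy compute_max_prefix_greedy_alt
  congr 1
  generalize word.toList = w
  by_cases hnil : w = []
  · subst hnil
    rfl
  · obtain ⟨β, hβ⟩ := pvExistsMax hnil
    have hn : 1 ≤ w.length := by
      cases w with
      | nil => exact absurd rfl hnil
      | cons a x => simp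
    rw [pvLoopA_eq hβ w.length 0 1 1 1 true (by omega) (pvA_init hn),
        pvLoopB_eq hβ (3 * w.length) 0 1 0 (by omega) (pvB_init w)]
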